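-- pv_equiv track=rewrite | github.com/tr1ten/DNA | codingninjas/MaxMinPath.py | pathWithMaxMinValue
-- ===== SOURCE A (Python) =====
-- import heapq
--
-- def pathWithMaxMinValue(arr):
-- 	# Write your code here.
-- 	pq = [(-arr[0][0],0,0)]
-- 	seen = set()
-- 	seen.add((0,0)) # no need to mentain distance vector since we ensure each cell visited with max value till then
-- 	while pq:
-- 		d,y,x = heapq.heappop(pq)
-- 		if(y==len(arr)-1 and x==len(arr[0])-1): return -d
-- 		for dx,dy in [(1,0),(0,1),(-1,0),(0,-1)]:
-- 			i,j = y+dy,x+dx;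
-- 			if i<len(arr) and j<len(arr[0]) and j>=0 and i>=0 and (i,j) not in seen:
-- 				heapq.heappush(pq,((-min(-d,arr[i][j]),i,j)))
-- 				seen.add((i,j))
-- 	return -1
-- ===== SOURCE B (Python) =====
-- def pathWithMaxMinValue(arr):
--     # Threshold view: the answer is the largest cell value v such that the two
--     # corners are connected through cells of value >= v.  Binary-search that
--     # threshold over the descending sorted distinct values, deciding each
--     # candidate with an iterative DFS flood fill.
--     n, m = len(arr), len(arr[0])
--
--     def connected(v):
--         if arr[0][0] < v:
--             return False
--         visited = {(0, 0)}
--         stack = [(0, 0)]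
--         while stack:
--             y, x = stack.pop()
--             for i, j in ((y + 1, x), (y - 1, x), (y, x + 1), (y, x - 1)):
--                 if 0 <= i < n and 0 <= j < m and (i, j) not in visited and arr[i][j] >= v:
--                     visited.add((i, j))
--                     stack.append((i, j))
--         return (n - 1, m - 1) in visited
--
--     vals = sorted({arr[i][j] for i in range(n) for j in range(m)}, reverse=True)
--     lo, hi = 0, len(vals) - 1
--     # invariant: connected(vals[hi]) holds (the global minimum always connects),
--     # and connected(vals[i]) is false for every i < lo
--     while lo < hi:
--         mid = (lo + hi) // 2
--         if connected(vals[mid]):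
--             hi = mid
--         else:
--             lo = mid + 1
--     return vals[lo]
-- ===== Notes on version B (the rewrite author's own statement) =====
-- stated objective: alternative
-- what changed: A runs a best-first (Dijkstra-style) search with a heap keyed by the running maximin value; B instead binary-searches the answer over the descending sorted distinct cell values, deciding each candidate threshold with an iterative DFS flood fill over cells >= that value.
-- outside the precondition, e.g. on pathWithMaxMinValue([[4, 6, 0, 9], [8, 0, 0], [4, 6, 2, 3]]): A returns 2, B raises IndexError
import Mathlib
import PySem

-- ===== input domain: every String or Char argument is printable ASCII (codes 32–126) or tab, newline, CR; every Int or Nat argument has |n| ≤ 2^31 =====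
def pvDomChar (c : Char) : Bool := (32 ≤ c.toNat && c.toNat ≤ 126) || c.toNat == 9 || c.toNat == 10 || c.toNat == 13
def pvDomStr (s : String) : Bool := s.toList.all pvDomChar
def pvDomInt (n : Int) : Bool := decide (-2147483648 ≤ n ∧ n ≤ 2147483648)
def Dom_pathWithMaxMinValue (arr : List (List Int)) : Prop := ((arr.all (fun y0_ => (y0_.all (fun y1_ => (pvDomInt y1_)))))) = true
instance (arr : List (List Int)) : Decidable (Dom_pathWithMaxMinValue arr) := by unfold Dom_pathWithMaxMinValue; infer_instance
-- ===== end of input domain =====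

-- B re-implements the maximin-path search as a binary search over the sorted distinct
-- cell values, deciding each candidate threshold with a DFS flood fill (A: best-first
-- Dijkstra-style search with a heap); equal return values proved on Pre_.

-- ===== PORT A =====
-- arr[i][j] (total form; exact for in-range indices, which Pre_ guarantees)
def pvVal (arr : List (List Int)) (i j : Int) : Int :=
  PySem.List.pyGetD (PySem.List.pyGetD arr i []) j 0

-- CPython's heapq compares the pushed (d, y, x) triples lexicographically; the heap is
-- modelled as a list kept sorted ascending in that order, so heappop = take the head,
-- exactly heapq's pop order.
def pvLeT (a b : Int × Int × Int) : Bool :=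
  decide (a.1 < b.1) || (decide (a.1 = b.1) &&
    (decide (a.2.1 < b.2.1) || (decide (a.2.1 = b.2.1) && decide (a.2.2 ≤ b.2.2))))

def pvPush (e : Int × Int × Int) : List (Int × Int × Int) → List (Int × Int × Int)
  | [] => [e]
  | h :: t => if pvLeT e h then e :: h :: t else h :: pvPush e t

-- body of A's `for dx,dy in …` loop, phrased on the neighbour cell c = (y+dy, x+dx)
def pvCellStepA (arr : List (List Int)) (d : Int)
    (st : List (Int × Int × Int) × PySem.Set (Int × Int)) (c : Int × Int) :
    List (Int × Int × Int) × PySem.Set (Int × Int) :=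
  if c.1 < (arr.length : Int) ∧ c.2 < ((arr.getD 0 []).length : Int) ∧ 0 ≤ c.2 ∧ 0 ≤ c.1
      ∧ (c.1, c.2) ∉ st.2 then
    (pvPush (-(min (-d) (pvVal arr c.1 c.2)), c.1, c.2) st.1, PySem.Set.add st.2 (c.1, c.2))
  else st

def pvStepA (arr : List (List Int)) (d y x : Int)
    (st : List (Int × Int × Int) × PySem.Set (Int × Int)) (dxy : Int × Int) :
    List (Int × Int × Int) × PySem.Set (Int × Int) :=
  pvCellStepA arr d st (y + dxy.2, x + dxy.1)

-- A's `while pq` loop; the fuel argument only makes the recursion structural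
-- (fuel n*m+1 is proved sufficient under Pre_: each pop retires one unseen cell)
def pvLoopA (arr : List (List Int)) :
    Nat → List (Int × Int × Int) → PySem.Set (Int × Int) → Int
  | 0, _, _ => -1
  | _ + 1, [], _ => -1
  | fuel + 1, (d, y, x) :: rest, seen =>
    if y = (arr.length : Int) - 1 ∧ x = ((arr.getD 0 []).length : Int) - 1 then -d
    else
      let st := [((1 : Int), (0 : Int)), (0, 1), (-1, 0), (0, -1)].foldl (pvStepA arr d y x) (rest, seen)
      pvLoopA arr fuel st.1 st.2

def pathWithMaxMinValue (arr : List (List Int)) : Int :=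
  pvLoopA arr (arr.length * (arr.getD 0 []).length + 1)
    [(-(pvVal arr 0 0), 0, 0)] (PySem.Set.ofList [((0 : Int), (0 : Int))])

-- ===== PORT B =====
-- body of B's `for i,j in …` loop inside connected()
def pvStepB (arr : List (List Int)) (v : Int)
    (st : List (Int × Int) × PySem.Set (Int × Int)) (c : Int × Int) :
    List (Int × Int) × PySem.Set (Int × Int) :=
  if 0 ≤ c.1 ∧ c.1 < (arr.length : Int) ∧ 0 ≤ c.2 ∧ c.2 < ((arr.getD 0 []).length : Int)
      ∧ (c.1, c.2) ∉ st.2 ∧ v ≤ pvVal arr c.1 c.2 then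
    (st.1 ++ [(c.1, c.2)], PySem.Set.add st.2 (c.1, c.2))
  else st

-- B's `while stack` DFS loop (stack.pop() pops the last element); fuel n*m+1 is
-- proved sufficient under Pre_ (each iteration retires one visited cell)
def pvDfs (arr : List (List Int)) (v : Int) :
    Nat → List (Int × Int) → PySem.Set (Int × Int) → PySem.Set (Int × Int)
  | 0, _, vis => vis
  | fuel + 1, stk, vis =>
    match PySem.List.pop? stk (-1) with
    | none => vis
    | some ((y, x), rest) =>
      let st := [(y + 1, x), (y - 1, x), (y, x + 1), (y, x - 1)].foldl (pvStepB arr v) (rest, vis)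
      pvDfs arr v fuel st.1 st.2

def pvConnected (arr : List (List Int)) (v : Int) : Bool :=
  if pvVal arr 0 0 < v then false
  else
    let vis := pvDfs arr v (arr.length * (arr.getD 0 []).length + 1)
      [((0 : Int), (0 : Int))] (PySem.Set.ofList [((0 : Int), (0 : Int))])
    decide (((arr.length : Int) - 1, ((arr.getD 0 []).length : Int) - 1) ∈ vis)

-- {arr[i][j] for i in range(n) for j in range(m)}
def pvAllVals (arr : List (List Int)) : List Int :=
  (PySem.List.pyRange 0 (arr.length : Int) 1).flatMap
    (fun i => (PySem.List.pyRange 0 ((arr.getD 0 []).length : Int) 1).map (fun j => pvVal arr i j))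

-- sorted({…}, reverse=True)
def pvVals (arr : List (List Int)) : List Int :=
  PySem.List.sorted (PySem.Set.ofList (pvAllVals arr)) (fun x => x) true

-- B's `while lo < hi` binary search
def pvSearch (arr : List (List Int)) (vals : List Int) (lo hi : Int) : Int :=
  if h : lo < hi then
    let mid := PySem.Int.floordiv (lo + hi) 2
    if pvConnected arr (PySem.List.pyGetD vals mid 0) then pvSearch arr vals lo mid
    else pvSearch arr vals (mid + 1) hi
  else PySem.List.pyGetD vals lo 0
termination_by (hi - lo).toNat
decreasing_by
  · have h1 := PySem.Int.floordiv_two_mid_bounds (le_of_lt h)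
    have h2 : PySem.Int.floordiv (lo + hi) 2 < hi :=
      (PySem.Int.floordiv_lt_iff_lt_mul (by omega)).2 (by omega)
    omega
  · have h1 := PySem.Int.floordiv_two_mid_bounds (le_of_lt h)
    have h2 : PySem.Int.floordiv (lo + hi) 2 < hi :=
      (PySem.Int.floordiv_lt_iff_lt_mul (by omega)).2 (by omega)
    omega

def pathWithMaxMinValue_alt (arr : List (List Int)) : Int :=
  let vals := pvVals arr
  pvSearch arr vals 0 ((vals.length : Int) - 1)

-- ===== PRECONDITION & SPEC =====
-- Pre_ excludes inputs on which A raises IndexError (empty grid, empty first row, a row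
-- shorter than the first row that A's search touches); on the rare ragged inputs where
-- A happens to return before touching a short row it still returns, but B (which reads
-- the whole n×m prefix up front) raises there — those accidental survivals are excluded.
def Pre_pathWithMaxMinValue (arr : List (List Int)) : Prop :=
  arr ≠ [] ∧ arr.getD 0 [] ≠ [] ∧ ∀ row ∈ arr, (arr.getD 0 []).length ≤ row.length

instance (arr : List (List Int)) : Decidable (Pre_pathWithMaxMinValue arr) := by
  unfold Pre_pathWithMaxMinValue; infer_instance

def pvWitness_pathWithMaxMinValue : List (List Int) := [[3, 1], [4, 2]]

def Spec_pathWithMaxMinValue (arr : List (List Int)) (out : Int) : Prop :=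
  out = pathWithMaxMinValue_alt arr

instance (arr : List (List Int)) (out : Int) : Decidable (Spec_pathWithMaxMinValue arr out) := by
  unfold Spec_pathWithMaxMinValue; infer_instance

-- ===== CLAIM (what is proved, stated in full; the proofs are below) =====
def Claim_equal_pathWithMaxMinValue : Prop := ∀ (arr : List (List Int)), Dom_pathWithMaxMinValue arr → Pre_pathWithMaxMinValue arr → Spec_pathWithMaxMinValue arr (pathWithMaxMinValue arr)

-- ===== LEMMAS AND PROOFS =====


-- derived grid notions shared by both correctness arguments
def pvN (arr : List (List Int)) : Int := (arr.length : Int)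
def pvM (arr : List (List Int)) : Int := ((arr.getD 0 []).length : Int)
def pvEnd (arr : List (List Int)) : Int × Int := (pvN arr - 1, pvM arr - 1)

def InG (arr : List (List Int)) (c : Int × Int) : Prop :=
  0 ≤ c.1 ∧ c.1 < pvN arr ∧ 0 ≤ c.2 ∧ c.2 < pvM arr

def Adj (c z : Int × Int) : Prop :=
  z = (c.1 + 1, c.2) ∨ z = (c.1 - 1, c.2) ∨ z = (c.1, c.2 + 1) ∨ z = (c.1, c.2 - 1)

-- c is joined to the start corner by a 4-adjacent path all of whose cells have value ≥ v
inductive Reach (arr : List (List Int)) (v : Int) : Int × Int → Prop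
  | start (h : v ≤ pvVal arr 0 0) : Reach arr v (0, 0)
  | step {c z : Int × Int} (hr : Reach arr v c) (ha : Adj c z) (hg : InG arr z)
      (hv : v ≤ pvVal arr z.1 z.2) : Reach arr v z

-- the common characterisation both programs are proved to satisfy
def IsAns (arr : List (List Int)) (w : Int) : Prop :=
  Reach arr w (pvEnd arr) ∧ ∀ u, Reach arr u (pvEnd arr) → u ≤ w

lemma isAns_unique {arr : List (List Int)} {w w' : Int}
    (h : IsAns arr w) (h' : IsAns arr w') : w = w' :=
  le_antisymm (h'.2 w h.1) (h.2 w' h'.1)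

lemma reach_mono {arr : List (List Int)} {v u : Int} {c : Int × Int}
    (hu : u ≤ v) (h : Reach arr v c) : Reach arr u c := by
  induction h with
  | start h => exact .start (le_trans hu h)
  | step hr ha hg hv ih => exact .step ih ha hg (le_trans hu hv)

lemma reach_le_start {arr : List (List Int)} {v : Int} {c : Int × Int}
    (h : Reach arr v c) : v ≤ pvVal arr 0 0 := by
  induction h with
  | start h => exact h
  | step hr ha hg hv ih => exact ih

lemma reach_le_val {arr : List (List Int)} {v : Int} {c : Int × Int}
    (h : Reach arr v c) : v ≤ pvVal arr c.1 c.2 := by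
  cases h with
  | start h => exact h
  | step hr ha hg hv => exact hv

lemma pre_n {arr : List (List Int)} (h : Pre_pathWithMaxMinValue arr) : 0 < pvN arr := by
  obtain ⟨h1, -, -⟩ := h
  cases arr with
  | nil => exact absurd rfl h1
  | cons a t => simp [pvN]

lemma pre_m {arr : List (List Int)} (h : Pre_pathWithMaxMinValue arr) : 0 < pvM arr := by
  obtain ⟨-, h2, -⟩ := h
  cases harr : arr.getD 0 [] with
  | nil => exact absurd harr h2
  | cons a t => unfold pvM; rw [harr]; simp

lemma inG_start {arr : List (List Int)} (hp : Pre_pathWithMaxMinValue arr) :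
    InG arr (0, 0) :=
  ⟨le_refl _, pre_n hp, le_refl _, pre_m hp⟩

lemma inG_end {arr : List (List Int)} (hp : Pre_pathWithMaxMinValue arr) :
    InG arr (pvEnd arr) := by
  have h1 := pre_n hp; have h2 := pre_m hp
  refine ⟨?_, ?_, ?_, ?_⟩
  · show (0 : Int) ≤ pvN arr - 1; omega
  · show pvN arr - 1 < pvN arr; omega
  · show (0 : Int) ≤ pvM arr - 1; omega
  · show pvM arr - 1 < pvM arr; omega

lemma mem_allVals {arr : List (List Int)} {c : Int × Int} (hg : InG arr c) :
    pvVal arr c.1 c.2 ∈ pvAllVals arr := by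
  unfold pvAllVals
  rw [List.mem_flatMap]
  refine ⟨c.1, ?_, List.mem_map.2 ⟨c.2, ?_, rfl⟩⟩
  · rw [PySem.List.mem_pyRange_one]; exact ⟨hg.1, hg.2.1⟩
  · rw [PySem.List.mem_pyRange_one]; exact ⟨hg.2.2.1, hg.2.2.2⟩

-- the global minimum value of the grid
def pvMinV (arr : List (List Int)) : Int := (pvAllVals arr).foldl min (pvVal arr 0 0)

lemma foldl_min_le_init : ∀ (l : List Int) (a : Int), l.foldl min a ≤ a := by
  intro l
  induction l with
  | nil => intro a; exact le_refl a
  | cons b t ih => intro a; exact le_trans (ih (min a b)) (min_le_left a b)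

lemma foldl_min_le_mem : ∀ (l : List Int) (a x : Int), x ∈ l → l.foldl min a ≤ x := by
  intro l
  induction l with
  | nil => intro a x hx; cases hx
  | cons b t ih =>
    intro a x hx
    rcases List.mem_cons.1 hx with rfl | hx
    · exact le_trans (foldl_min_le_init t (min a x)) (min_le_right a x)
    · exact ih (min a b) x hx

lemma foldl_min_mem : ∀ (l : List Int) (a : Int), l.foldl min a = a ∨ l.foldl min a ∈ l := by
  intro l
  induction l with
  | nil => intro a; exact Or.inl rfl
  | cons b t ih =>
    intro a
    rcases ih (min a b) with h | h
    · rcases min_choice a b with h' | h'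
      · exact Or.inl (by rw [List.foldl_cons, h, h'])
      · exact Or.inr (by rw [List.foldl_cons, h, h']; exact List.mem_cons_self ..)
    · exact Or.inr (List.mem_cons_of_mem b h)

lemma pvMinV_le {arr : List (List Int)} {x : Int} (hx : x ∈ pvAllVals arr) :
    pvMinV arr ≤ x := foldl_min_le_mem _ _ _ hx

lemma pvMinV_le_start (arr : List (List Int)) : pvMinV arr ≤ pvVal arr 0 0 :=
  foldl_min_le_init _ _

lemma pvMinV_mem {arr : List (List Int)} (hp : Pre_pathWithMaxMinValue arr) :
    pvMinV arr ∈ pvAllVals arr := by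
  rcases foldl_min_mem (pvAllVals arr) (pvVal arr 0 0) with h | h
  · unfold pvMinV; rw [h]; exact mem_allVals (inG_start hp)
  · exact h

lemma reach_min_col {arr : List (List Int)} (hp : Pre_pathWithMaxMinValue arr) :
    ∀ a : Nat, (a : Int) < pvN arr → Reach arr (pvMinV arr) ((a : Int), 0) := by
  intro a
  induction a with
  | zero => intro _; exact .start (pvMinV_le_start arr)
  | succ a ih =>
    intro ha
    have ha' : (a : Int) < pvN arr := by push_cast at ha ⊢; omega
    have hg : InG arr (((a : Nat) + 1 : Nat), 0) := by
      refine ⟨by push_cast; omega, by push_cast at ha ⊢; omega, le_refl _, pre_m hp⟩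
    refine .step (ih ha') ?_ hg (pvMinV_le (mem_allVals hg))
    left; rw [Prod.mk.injEq]; exact ⟨by omega, rfl⟩

lemma reach_min_row {arr : List (List Int)} (hp : Pre_pathWithMaxMinValue arr) :
    ∀ b : Nat, (b : Int) < pvM arr → Reach arr (pvMinV arr) (pvN arr - 1, (b : Int)) := by
  intro b
  induction b with
  | zero =>
    intro _
    have hn := pre_n hp
    have hcast : ((arr.length - 1 : Nat) : Int) = pvN arr - 1 := by
      simp [pvN] at hn ⊢; omega
    have := reach_min_col hp (arr.length - 1) (by rw [hcast]; omega)
    rw [hcast] at this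
    exact this
  | succ b ih =>
    intro hb
    have hb' : (b : Int) < pvM arr := by push_cast at hb ⊢; omega
    have hg : InG arr (pvN arr - 1, ((b : Nat) + 1 : Nat)) := by
      have hn := pre_n hp
      refine ⟨by omega, by omega, by push_cast; omega, by push_cast at hb ⊢; omega⟩
    refine .step (ih hb') ?_ hg (pvMinV_le (mem_allVals hg))
    right; right; left; rw [Prod.mk.injEq]; exact ⟨rfl, by omega⟩

lemma reach_min_end {arr : List (List Int)} (hp : Pre_pathWithMaxMinValue arr) :
    Reach arr (pvMinV arr) (pvEnd arr) := by
  have hm := pre_m hp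
  have hcast : (((arr.getD 0 []).length - 1 : Nat) : Int) = pvM arr - 1 := by
    simp [pvM] at hm ⊢; omega
  have := reach_min_row hp ((arr.getD 0 []).length - 1) (by rw [hcast]; omega)
  rw [hcast] at this
  exact this

-- every reachability level can be rounded up to a grid value at the same cell
lemma reach_round {arr : List (List Int)} {v : Int} {c : Int × Int}
    (hp : Pre_pathWithMaxMinValue arr) (h : Reach arr v c) :
    ∃ v', v' ∈ pvAllVals arr ∧ v ≤ v' ∧ Reach arr v' c := by
  induction h with
  | start h =>
    exact ⟨pvVal arr 0 0, mem_allVals (inG_start hp), h, .start (le_refl _)⟩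
  | @step c z hr ha hg hv ih =>
    obtain ⟨v', hm, hle, hr'⟩ := ih
    refine ⟨min v' (pvVal arr z.1 z.2), ?_, le_min hle hv,
      .step (reach_mono (min_le_left _ _) hr') ha hg (min_le_right _ _)⟩
    rcases min_choice v' (pvVal arr z.1 z.2) with h' | h' <;> rw [h']
    · exact hm
    · exact mem_allVals hg

-- generic cardinality: a duplicate-free list of in-grid cells has at most n*m entries
lemma nodup_subset_length {α : Type} [DecidableEq α] {l l' : List α}
    (h : l.Nodup) (hs : l ⊆ l') : l.length ≤ l'.length := by
  have h1 : l.toFinset.card = l.length := List.toFinset_card_of_nodup h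
  have h2 : l.toFinset ⊆ l'.toFinset := by
    intro x hx; simp only [List.mem_toFinset] at hx ⊢; exact hs hx
  have h3 := Finset.card_le_card h2
  have h4 : l'.toFinset.card ≤ l'.length := l'.toFinset_card_le
  omega

lemma card_grid (arr : List (List Int)) (l : List (Int × Int))
    (hn : l.Nodup) (hg : ∀ c ∈ l, InG arr c) :
    l.length ≤ arr.length * (arr.getD 0 []).length := by
  classical
  have hinj : ∀ x ∈ l, ∀ y ∈ l, (x.1.toNat, x.2.toNat) = (y.1.toNat, y.2.toNat) → x = y := by
    intro x hx y hy hf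
    obtain ⟨a1, -, a3, -⟩ := hg x hx
    obtain ⟨b1, -, b3, -⟩ := hg y hy
    rw [Prod.mk.injEq] at hf
    have : x.1 = y.1 ∧ x.2 = y.2 := by omega
    exact Prod.ext this.1 this.2
  have hnd : (l.map (fun c => (c.1.toNat, c.2.toNat))).Nodup := hn.map_on hinj
  have hsub : (l.map (fun c => (c.1.toNat, c.2.toNat))) ⊆
      (List.range arr.length) ×ˢ (List.range (arr.getD 0 []).length) := by
    intro p hp
    obtain ⟨c, hc, rfl⟩ := List.mem_map.1 hp
    obtain ⟨a1, a2, a3, a4⟩ := hg c hc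
    simp only [pvN, pvM] at a2 a4
    rw [List.mem_product]
    exact ⟨List.mem_range.2 (by omega), List.mem_range.2 (by omega)⟩
  have := nodup_subset_length hnd hsub
  simp only [List.length_map, List.length_product, List.length_range] at this
  omega

-- ===== heap-as-sorted-list facts (port A) =====
lemma pvLeT_trans {a b c : Int × Int × Int}
    (h1 : pvLeT a b = true) (h2 : pvLeT b c = true) : pvLeT a c = true := by
  simp only [pvLeT, Bool.or_eq_true, Bool.and_eq_true, decide_eq_true_eq] at *
  omega

lemma pvLeT_total (a b : Int × Int × Int) : pvLeT a b = true ∨ pvLeT b a = true := by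
  simp only [pvLeT, Bool.or_eq_true, Bool.and_eq_true, decide_eq_true_eq]
  omega

lemma pvLeT_fst {a b : Int × Int × Int} (h : pvLeT a b = true) : a.1 ≤ b.1 := by
  simp only [pvLeT, Bool.or_eq_true, Bool.and_eq_true, decide_eq_true_eq] at h
  omega

lemma mem_pvPush (e : Int × Int × Int) :
    ∀ (l : List (Int × Int × Int)) (a : Int × Int × Int),
      a ∈ pvPush e l ↔ a = e ∨ a ∈ l := by
  intro l
  induction l with
  | nil => intro a; simp [pvPush]
  | cons b t ih =>
    intro a
    unfold pvPush
    split_ifs with hle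
    · simp only [List.mem_cons]
    · rw [List.mem_cons, ih]; simp only [List.mem_cons]; tauto

lemma pairwise_pvPush {e : Int × Int × Int} {l : List (Int × Int × Int)}
    (h : l.Pairwise (fun a b => pvLeT a b = true)) :
    (pvPush e l).Pairwise (fun a b => pvLeT a b = true) := by
  induction l with
  | nil => simp [pvPush]
  | cons b t ih =>
    obtain ⟨hb, ht⟩ := List.pairwise_cons.1 h
    unfold pvPush
    split_ifs with hle
    · refine List.pairwise_cons.2 ⟨?_, h⟩
      intro a ha
      rcases List.mem_cons.1 ha with rfl | ha
      · exact hle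
      · exact pvLeT_trans hle (hb a ha)
    · refine List.pairwise_cons.2 ⟨?_, ih ht⟩
      intro a ha
      rcases (mem_pvPush e t a).1 ha with rfl | ha
      · exact (pvLeT_total b a).resolve_right (fun h' => hle h')
      · exact hb a ha

lemma perm_pvPush (e : Int × Int × Int) (l : List (Int × Int × Int)) :
    (pvPush e l).Perm (e :: l) := by
  induction l with
  | nil => exact List.Perm.refl _
  | cons b t ih =>
    unfold pvPush
    split_ifs with hle
    · exact List.Perm.refl _
    · exact (List.Perm.cons b ih).trans (List.Perm.swap e b t)

lemma foldl_pvPush_perm (ent : (Int × Int) → Int × Int × Int) :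
    ∀ (cs : List (Int × Int)) (l : List (Int × Int × Int)),
      (cs.foldl (fun acc c => pvPush (ent c) acc) l).Perm (cs.map ent ++ l) := by
  intro cs
  induction cs with
  | nil => intro l; simp
  | cons c t ih =>
    intro l
    simp only [List.foldl_cons, List.map_cons]
    exact ((ih (pvPush (ent c) l)).trans
      (List.Perm.append_left _ (perm_pvPush (ent c) l))).trans List.perm_middle

lemma pairwise_foldl_pvPush (ent : (Int × Int) → Int × Int × Int) :
    ∀ (cs : List (Int × Int)) (l : List (Int × Int × Int)),
      l.Pairwise (fun a b => pvLeT a b = true) →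
      (cs.foldl (fun acc c => pvPush (ent c) acc) l).Pairwise (fun a b => pvLeT a b = true) := by
  intro cs
  induction cs with
  | nil => intro l h; exact h
  | cons c t ih => intro l h; exact ih _ (pairwise_pvPush h)

def cellOf (e : Int × Int × Int) : Int × Int := (e.2.1, e.2.2)

-- ===== characterisation of one pop-iteration's neighbour fold (port A) =====
def pvEligA (arr : List (List Int)) (s : PySem.Set (Int × Int)) (c : Int × Int) : Bool :=
  decide (c.1 < (arr.length : Int) ∧ c.2 < ((arr.getD 0 []).length : Int) ∧ 0 ≤ c.2 ∧ 0 ≤ c.1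
    ∧ (c.1, c.2) ∉ s)

lemma foldA_char (arr : List (List Int)) (d : Int) :
    ∀ (cs : List (Int × Int)) (pq : List (Int × Int × Int)) (s : PySem.Set (Int × Int)),
      cs.Nodup →
      cs.foldl (pvCellStepA arr d) (pq, s) =
        ((cs.filter (pvEligA arr s)).foldl
            (fun acc c => pvPush (-(min (-d) (pvVal arr c.1 c.2)), c.1, c.2) acc) pq,
         s ++ cs.filter (pvEligA arr s)) := by
  intro cs
  induction cs with
  | nil => intro pq s _; simp
  | cons c t ih =>
    intro pq s hnd
    obtain ⟨hc, ht⟩ := List.nodup_cons.1 hnd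
    by_cases hel : pvEligA arr s c = true
    · have hcond : c.1 < (arr.length : Int) ∧ c.2 < ((arr.getD 0 []).length : Int)
          ∧ 0 ≤ c.2 ∧ 0 ≤ c.1 ∧ (c.1, c.2) ∉ s := of_decide_eq_true hel
      have hnm : (c.1, c.2) ∉ s := hcond.2.2.2.2
      simp only [List.foldl_cons, List.filter_cons, hel, if_true]
      show (t.foldl (pvCellStepA arr d) (pvCellStepA arr d (pq, s) c)) = _
      rw [show pvCellStepA arr d (pq, s) c
            = (pvPush (-(min (-d) (pvVal arr c.1 c.2)), c.1, c.2) pq, PySem.Set.add s (c.1, c.2))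
          from by unfold pvCellStepA; rw [if_pos hcond]]
      rw [PySem.Set.add_of_not_mem hnm]
      rw [ih _ _ ht]
      have hfe : ∀ a ∈ t, pvEligA arr (s ++ [(c.1, c.2)]) a = pvEligA arr s a := by
        intro a ha
        have hne : a ≠ c := fun h => hc (h ▸ ha)
        have hpair : (a.1, a.2) ≠ (c.1, c.2) := by
          intro h; rw [Prod.mk.injEq] at h; exact hne (Prod.ext h.1 h.2)
        simp only [pvEligA, List.mem_append, List.mem_singleton, hpair, or_false]
      rw [List.filter_congr hfe]
      rw [List.append_assoc, List.singleton_append]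
    · have hcond : ¬(c.1 < (arr.length : Int) ∧ c.2 < ((arr.getD 0 []).length : Int)
          ∧ 0 ≤ c.2 ∧ 0 ≤ c.1 ∧ (c.1, c.2) ∉ s) := by
        intro h; exact hel (decide_eq_true h)
      simp only [List.foldl_cons, List.filter_cons, hel, if_false, Bool.false_eq_true]
      show (t.foldl (pvCellStepA arr d) (pvCellStepA arr d (pq, s) c)) = _
      rw [show pvCellStepA arr d (pq, s) c = (pq, s) from by unfold pvCellStepA; rw [if_neg hcond]]
      exact ih _ _ ht

-- ===== loop invariant for port A (Dijkstra-style best-first flood) =====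
structure InvA (arr : List (List Int)) (P : List (Int × Int))
    (pq : List (Int × Int × Int)) (seen : PySem.Set (Int × Int)) : Prop where
  sorted : pq.Pairwise (fun a b => pvLeT a b = true)
  nodupP : P.Nodup
  nodupQ : (pq.map cellOf).Nodup
  disjPQ : ∀ c ∈ P, c ∉ pq.map cellOf
  seenIff : ∀ c, c ∈ seen ↔ c ∈ P ∨ c ∈ pq.map cellOf
  grid : ∀ c, c ∈ P ∨ c ∈ pq.map cellOf → InG arr c
  startIn : ((0, 0) : Int × Int) ∈ P ∨ ((0, 0) : Int × Int) ∈ pq.map cellOf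
  endNotP : pvEnd arr ∉ P
  sound : ∀ e ∈ pq, Reach arr (-e.1) (cellOf e)
  maxim : ∀ e ∈ pq, ∀ u, Reach arr u (cellOf e) → u ≤ -e.1
  closure : ∀ c ∈ P, ∀ z, Adj c z → InG arr z → z ∈ P ∨ z ∈ pq.map cellOf

lemma head_key {pq : List (Int × Int × Int)}
    (hs : pq.Pairwise (fun a b => pvLeT a b = true)) {e : Int × Int × Int} (he : e ∈ pq) :
    ∃ e1 rest, pq = e1 :: rest ∧ -e.1 ≤ -e1.1 := by
  cases pq with
  | nil => cases he
  | cons e1 rest =>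
    refine ⟨e1, rest, rfl, ?_⟩
    rcases List.mem_cons.1 he with rfl | h
    · exact le_refl _
    · have := pvLeT_fst ((List.pairwise_cons.1 hs).1 e h); omega

lemma bound_of_mem_cells {arr : List (List Int)} {P : List (Int × Int)}
    {pq : List (Int × Int × Int)} {seen : PySem.Set (Int × Int)}
    (hI : InvA arr P pq seen) {z : Int × Int} {u : Int}
    (hz : z ∈ pq.map cellOf) (hu : Reach arr u z) :
    ∃ e1 rest, pq = e1 :: rest ∧ u ≤ -e1.1 := by
  obtain ⟨e, he, hce⟩ := List.mem_map.1 hz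
  obtain ⟨e1, rest, hpq, hle⟩ := head_key hI.sorted he
  exact ⟨e1, rest, hpq, le_trans (hI.maxim e he u (hce ▸ hu)) hle⟩

-- the frontier property: any cell reachable at level u which is not yet popped
-- forces a heap entry of key ≥ u at the head
lemma frontA {arr : List (List Int)} {P : List (Int × Int)}
    {pq : List (Int × Int × Int)} {seen : PySem.Set (Int × Int)}
    (hI : InvA arr P pq seen) {u : Int} {z : Int × Int}
    (h : Reach arr u z) (hnp : z ∉ P) :
    ∃ e1 rest, pq = e1 :: rest ∧ u ≤ -e1.1 := by
  induction h with
  | start h =>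
    exact bound_of_mem_cells hI (hI.startIn.resolve_left hnp) (.start h)
  | @step c z hr ha hg hv ih =>
    by_cases hcP : c ∈ P
    · exact bound_of_mem_cells hI ((hI.closure c hcP z ha hg).resolve_left hnp)
        (.step hr ha hg hv)
    · exact ih hcP


def pvEnt (arr : List (List Int)) (d : Int) (c : Int × Int) : Int × Int × Int :=
  (-(min (-d) (pvVal arr c.1 c.2)), c.1, c.2)

lemma cellOf_pvEnt (arr : List (List Int)) (d : Int) (c : Int × Int) :
    cellOf (pvEnt arr d c) = c := rfl

lemma adj_of_mem_nbrs {y x : Int} {c : Int × Int}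
    (hc : c ∈ ([(y, x + 1), (y + 1, x), (y, x - 1), (y - 1, x)] : List (Int × Int))) :
    Adj (y, x) c := by
  simp only [List.mem_cons, List.not_mem_nil, or_false] at hc
  rcases hc with rfl | rfl | rfl | rfl
  · right; right; left; rfl
  · left; rfl
  · right; right; right; rfl
  · right; left; rfl

lemma nbrs_of_adj {y x : Int} {z : Int × Int} (hz : Adj (y, x) z) :
    z ∈ ([(y, x + 1), (y + 1, x), (y, x - 1), (y - 1, x)] : List (Int × Int)) := by
  rcases hz with rfl | rfl | rfl | rfl <;> simp

-- one non-terminal pop of the head entry (d, y, x) preserves the invariant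
lemma presA {arr : List (List Int)}
    {P : List (Int × Int)} {pq : List (Int × Int × Int)} {seen : PySem.Set (Int × Int)}
    {d y x : Int} {rest : List (Int × Int × Int)}
    (hI : InvA arr P pq seen) (hpq : pq = (d, y, x) :: rest)
    (hne : ((y, x) : Int × Int) ≠ pvEnd arr) :
    InvA arr ((y, x) :: P)
      (([((1 : Int), (0 : Int)), (0, 1), (-1, 0), (0, -1)].foldl (pvStepA arr d y x) (rest, seen)).1)
      (([((1 : Int), (0 : Int)), (0, 1), (-1, 0), (0, -1)].foldl (pvStepA arr d y x) (rest, seen)).2) := by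
  have hndn : ([(y, x + 1), (y + 1, x), (y, x - 1), (y - 1, x)] : List (Int × Int)).Nodup := by
    simp [Prod.ext_iff]; omega
  have hfold : [((1 : Int), (0 : Int)), (0, 1), (-1, 0), (0, -1)].foldl (pvStepA arr d y x) (rest, seen)
      = [(y, x + 1), (y + 1, x), (y, x - 1), (y - 1, x)].foldl (pvCellStepA arr d) (rest, seen) := by
    simp only [List.foldl_cons, List.foldl_nil, pvStepA]
    norm_num [sub_eq_add_neg]
  rw [hfold, foldA_char arr d _ rest seen hndn]
  set news := ([(y, x + 1), (y + 1, x), (y, x - 1), (y - 1, x)] : List (Int × Int)).filter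
    (pvEligA arr seen) with hnews
  show InvA arr ((y, x) :: P)
    (news.foldl (fun acc c => pvPush (-(min (-d) (pvVal arr c.1 c.2)), c.1, c.2) acc) rest)
    (seen ++ news)
  have hfoldEnt : news.foldl (fun acc c => pvPush (-(min (-d) (pvVal arr c.1 c.2)), c.1, c.2) acc) rest
      = news.foldl (fun acc c => pvPush (pvEnt arr d c) acc) rest := rfl
  rw [hfoldEnt]
  have hperm := foldl_pvPush_perm (pvEnt arr d) news rest
  have hmemE : ∀ e, e ∈ news.foldl (fun acc c => pvPush (pvEnt arr d c) acc) rest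
      ↔ (∃ c ∈ news, pvEnt arr d c = e) ∨ e ∈ rest := by
    intro e; rw [hperm.mem_iff, List.mem_append, List.mem_map]
  have hcellsPerm : ((news.foldl (fun acc c => pvPush (pvEnt arr d c) acc) rest).map cellOf).Perm
      (news ++ rest.map cellOf) := by
    have h1 := hperm.map cellOf
    rw [List.map_append, List.map_map] at h1
    simpa [Function.comp_def, cellOf_pvEnt] using h1
  have hmemC : ∀ c, c ∈ (news.foldl (fun acc c => pvPush (pvEnt arr d c) acc) rest).map cellOf
      ↔ c ∈ news ∨ c ∈ rest.map cellOf := by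
    intro c; rw [hcellsPerm.mem_iff, List.mem_append]
  have hpqC : pq.map cellOf = (y, x) :: rest.map cellOf := by rw [hpq]; rfl
  have hheadC : ((y, x) : Int × Int) ∈ pq.map cellOf := by
    rw [hpqC]; exact List.mem_cons_self ..
  have hseenYX : ((y, x) : Int × Int) ∈ seen := (hI.seenIff _).2 (Or.inr hheadC)
  have hfresh : ∀ c ∈ news, InG arr c ∧ c ∉ seen := by
    intro c hc
    have h1 := List.of_mem_filter hc
    have h2 : c.1 < (arr.length : Int) ∧ c.2 < ((arr.getD 0 []).length : Int)
        ∧ 0 ≤ c.2 ∧ 0 ≤ c.1 ∧ (c.1, c.2) ∉ seen := of_decide_eq_true h1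
    exact ⟨⟨h2.2.2.2.1, h2.1, h2.2.2.1, h2.2.1⟩, h2.2.2.2.2⟩
  have hAdjNews : ∀ c ∈ news, Adj (y, x) c :=
    fun c hc => adj_of_mem_nbrs (List.mem_of_mem_filter hc)
  have hrest_sub : ∀ e ∈ rest, e ∈ pq := by
    rw [hpq]; exact fun e he => List.mem_cons_of_mem _ he
  have hhead : ((d, y, x) : Int × Int × Int) ∈ pq := by rw [hpq]; exact List.mem_cons_self ..
  have hrestC_sub : ∀ c ∈ rest.map cellOf, c ∈ pq.map cellOf := by
    rw [hpqC]; exact fun c hc => List.mem_cons_of_mem _ hc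
  have hseenP : ∀ c ∈ P, c ∈ seen := fun c hc => (hI.seenIff c).2 (Or.inl hc)
  have hseenQ : ∀ c ∈ pq.map cellOf, c ∈ seen := fun c hc => (hI.seenIff c).2 (Or.inr hc)
  have hyNotRest : ((y, x) : Int × Int) ∉ rest.map cellOf := by
    have := hI.nodupQ; rw [hpqC] at this
    exact (List.nodup_cons.1 this).1
  have hrestNodup : (rest.map cellOf).Nodup := by
    have := hI.nodupQ; rw [hpqC] at this
    exact (List.nodup_cons.1 this).2
  refine { sorted := ?_, nodupP := ?_, nodupQ := ?_, disjPQ := ?_, seenIff := ?_, grid := ?_,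
           startIn := ?_, endNotP := ?_, sound := ?_, maxim := ?_, closure := ?_ }
  · apply pairwise_foldl_pvPush
    have := hI.sorted; rw [hpq] at this
    exact (List.pairwise_cons.1 this).2
  · exact List.nodup_cons.2 ⟨fun hyp => hI.disjPQ _ hyp hheadC, hI.nodupP⟩
  · rw [hcellsPerm.nodup_iff, List.nodup_append]
    refine ⟨List.Nodup.filter _ hndn, hrestNodup, ?_⟩
    intro a ha b hb heq
    exact (hfresh a ha).2 (hseenQ a (hrestC_sub a (by rw [heq]; exact hb)))
  · intro c hc hmem
    rcases (hmemC c).1 hmem with hn | hr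
    · rcases List.mem_cons.1 hc with rfl | hcP
      · exact (hfresh _ hn).2 hseenYX
      · exact (hfresh c hn).2 (hseenP c hcP)
    · rcases List.mem_cons.1 hc with rfl | hcP
      · exact hyNotRest hr
      · exact hI.disjPQ c hcP (hrestC_sub c hr)
  · intro c
    rw [List.mem_append, hI.seenIff c, hpqC, hmemC c]
    simp only [List.mem_cons]
    tauto
  · intro c hc
    rcases hc with hc | hc
    · rcases List.mem_cons.1 hc with rfl | hcP
      · exact hI.grid _ (Or.inr hheadC)
      · exact hI.grid c (Or.inl hcP)
    · rcases (hmemC c).1 hc with hn | hr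
      · exact (hfresh c hn).1
      · exact hI.grid c (Or.inr (hrestC_sub c hr))
  · rcases hI.startIn with h | h
    · exact Or.inl (List.mem_cons_of_mem _ h)
    · rw [hpqC] at h
      rcases List.mem_cons.1 h with h | h
      · exact Or.inl (by rw [h]; exact List.mem_cons_self ..)
      · exact Or.inr ((hmemC _).2 (Or.inr h))
  · intro hc
    rcases List.mem_cons.1 hc with h | h
    · exact hne h.symm
    · exact hI.endNotP h
  · intro e he
    rcases (hmemE e).1 he with ⟨c, hcn, rfl⟩ | hr
    · rw [cellOf_pvEnt]
      rw [show -(pvEnt arr d c).1 = min (-d) (pvVal arr c.1 c.2) from by simp [pvEnt]]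
      have hR : Reach arr (-d) ((y, x) : Int × Int) := hI.sound _ hhead
      exact .step (reach_mono (min_le_left _ _) hR) (hAdjNews c hcn) (hfresh c hcn).1
        (min_le_right _ _)
    · exact hI.sound e (hrest_sub e hr)
  · intro e he u hu
    rcases (hmemE e).1 he with ⟨c, hcn, rfl⟩ | hr
    · rw [cellOf_pvEnt] at hu
      rw [show -(pvEnt arr d c).1 = min (-d) (pvVal arr c.1 c.2) from by simp [pvEnt]]
      refine le_min ?_ (reach_le_val hu)
      have hcP : c ∉ P := fun hcp => (hfresh c hcn).2 (hseenP c hcp)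
      obtain ⟨e1, r1, heq, hle⟩ := frontA hI hu hcP
      rw [hpq] at heq
      injection heq with h1 h2
      rw [← h1] at hle
      exact hle
    · exact hI.maxim e (hrest_sub e hr) u hu
  · intro c hc z ha hg
    rcases List.mem_cons.1 hc with rfl | hcP
    · have hz := nbrs_of_adj ha
      by_cases hzs : z ∈ seen
      · rcases (hI.seenIff z).1 hzs with hzP | hzQ
        · exact Or.inl (List.mem_cons_of_mem _ hzP)
        · rw [hpqC] at hzQ
          rcases List.mem_cons.1 hzQ with h | h
          · exact Or.inl (by rw [h]; exact List.mem_cons_self ..)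
          · exact Or.inr ((hmemC z).2 (Or.inr h))
      · have helig : pvEligA arr seen z = true :=
          decide_eq_true ⟨hg.2.1, hg.2.2.2, hg.2.2.1, hg.1, hzs⟩
        exact Or.inr ((hmemC z).2 (Or.inl (List.mem_filter.2 ⟨hz, helig⟩)))
    · rcases hI.closure c hcP z ha hg with hzP | hzQ
      · exact Or.inl (List.mem_cons_of_mem _ hzP)
      · rw [hpqC] at hzQ
        rcases List.mem_cons.1 hzQ with h | h
        · exact Or.inl (by rw [h]; exact List.mem_cons_self ..)
        · exact Or.inr ((hmemC z).2 (Or.inr h))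

lemma lemA (arr : List (List Int)) (hp : Pre_pathWithMaxMinValue arr) :
    ∀ (fuel : Nat) (P : List (Int × Int)) (pq : List (Int × Int × Int))
      (seen : PySem.Set (Int × Int)),
      InvA arr P pq seen →
      arr.length * (arr.getD 0 []).length ≤ fuel + P.length →
      IsAns arr (pvLoopA arr fuel pq seen) := by
  intro fuel
  induction fuel with
  | zero =>
    intro P pq seen hI hf
    exfalso
    have hnd : (pvEnd arr :: P).Nodup := List.nodup_cons.2 ⟨hI.endNotP, hI.nodupP⟩
    have hgr : ∀ c ∈ pvEnd arr :: P, InG arr c := by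
      intro c hc
      rcases List.mem_cons.1 hc with rfl | hc
      · exact inG_end hp
      · exact hI.grid c (Or.inl hc)
    have := card_grid arr _ hnd hgr
    simp only [List.length_cons] at this
    omega
  | succ fuel ih =>
    intro P pq seen hI hf
    cases pq with
    | nil =>
      exfalso
      obtain ⟨e1, r1, heq, -⟩ := frontA hI (reach_min_end hp) hI.endNotP
      exact List.cons_ne_nil e1 r1 heq.symm
    | cons e rest =>
      obtain ⟨d, y, x⟩ := e
      simp only [pvLoopA]
      by_cases hend : y = (arr.length : Int) - 1 ∧ x = ((arr.getD 0 []).length : Int) - 1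
      · rw [if_pos hend]
        have hEnd : cellOf (d, y, x) = pvEnd arr := Prod.ext hend.1 hend.2
        constructor
        · have := hI.sound (d, y, x) (List.mem_cons_self ..)
          rw [hEnd] at this
          exact this
        · intro u hu
          exact hI.maxim (d, y, x) (List.mem_cons_self ..) u (by rw [hEnd]; exact hu)
      · rw [if_neg hend]
        have hne : ((y, x) : Int × Int) ≠ pvEnd arr := by
          intro h
          exact hend ⟨congrArg Prod.fst h, congrArg Prod.snd h⟩
        have hI' := presA hI rfl hne
        exact ih _ _ _ hI' (by simp only [List.length_cons]; omega)

lemma A_isAns (arr : List (List Int)) (hp : Pre_pathWithMaxMinValue arr) :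
    IsAns arr (pathWithMaxMinValue arr) := by
  unfold pathWithMaxMinValue
  apply lemA arr hp _ [] _ _ ?_ ?_
  · refine { sorted := ?_, nodupP := List.nodup_nil, nodupQ := ?_, disjPQ := ?_, seenIff := ?_,
             grid := ?_, startIn := ?_, endNotP := ?_, sound := ?_, maxim := ?_, closure := ?_ }
    · simp
    · simp
    · intro c hc; cases hc
    · intro c
      rw [PySem.Set.mem_ofList]
      simp [cellOf]
    · intro c hc
      rcases hc with h | h
      · cases h
      · simp only [List.map_cons, List.map_nil, List.mem_singleton] at h
        rw [h]
        exact inG_start hp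
    · exact Or.inr (by simp [cellOf])
    · simp
    · intro e he
      rw [List.mem_singleton] at he
      subst he
      show Reach arr (-(-(pvVal arr 0 0))) ((0 : Int), (0 : Int))
      rw [neg_neg]
      exact .start (le_refl _)
    · intro e he u hu
      rw [List.mem_singleton] at he
      subst he
      show u ≤ -(-(pvVal arr 0 0))
      rw [neg_neg]
      exact reach_le_start hu
    · intro c hc; cases hc
  · simp only [List.length_nil]
    omega


-- ===== characterisation of one DFS iteration's neighbour fold (port B) =====
def pvEligB (arr : List (List Int)) (v : Int) (s : PySem.Set (Int × Int)) (c : Int × Int) : Bool :=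
  decide (0 ≤ c.1 ∧ c.1 < (arr.length : Int) ∧ 0 ≤ c.2 ∧ c.2 < ((arr.getD 0 []).length : Int)
    ∧ (c.1, c.2) ∉ s ∧ v ≤ pvVal arr c.1 c.2)

lemma foldB_char (arr : List (List Int)) (v : Int) :
    ∀ (cs : List (Int × Int)) (stk : List (Int × Int)) (s : PySem.Set (Int × Int)),
      cs.Nodup →
      cs.foldl (pvStepB arr v) (stk, s) =
        (stk ++ cs.filter (pvEligB arr v s), s ++ cs.filter (pvEligB arr v s)) := by
  intro cs
  induction cs with
  | nil => intro stk s _; simp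
  | cons c t ih =>
    intro stk s hnd
    obtain ⟨hc, ht⟩ := List.nodup_cons.1 hnd
    by_cases hel : pvEligB arr v s c = true
    · have hcond : 0 ≤ c.1 ∧ c.1 < (arr.length : Int) ∧ 0 ≤ c.2
          ∧ c.2 < ((arr.getD 0 []).length : Int) ∧ (c.1, c.2) ∉ s ∧ v ≤ pvVal arr c.1 c.2 :=
        of_decide_eq_true hel
      simp only [List.foldl_cons, List.filter_cons, hel, if_true]
      show (t.foldl (pvStepB arr v) (pvStepB arr v (stk, s) c)) = _
      rw [show pvStepB arr v (stk, s) c = (stk ++ [(c.1, c.2)], PySem.Set.add s (c.1, c.2))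
          from by unfold pvStepB; rw [if_pos hcond]]
      rw [PySem.Set.add_of_not_mem hcond.2.2.2.2.1]
      rw [ih _ _ ht]
      have hfe : ∀ a ∈ t, pvEligB arr v (s ++ [(c.1, c.2)]) a = pvEligB arr v s a := by
        intro a ha
        have hne : a ≠ c := fun h => hc (h ▸ ha)
        have hpair : (a.1, a.2) ≠ (c.1, c.2) := by
          intro h; rw [Prod.mk.injEq] at h; exact hne (Prod.ext h.1 h.2)
        simp only [pvEligB, List.mem_append, List.mem_singleton, hpair, or_false]
      rw [List.filter_congr hfe]
      simp only [List.append_assoc, List.singleton_append]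
    · have hcond : ¬(0 ≤ c.1 ∧ c.1 < (arr.length : Int) ∧ 0 ≤ c.2
          ∧ c.2 < ((arr.getD 0 []).length : Int) ∧ (c.1, c.2) ∉ s ∧ v ≤ pvVal arr c.1 c.2) := by
        intro h; exact hel (decide_eq_true h)
      simp only [List.foldl_cons, List.filter_cons, hel, if_false, Bool.false_eq_true]
      show (t.foldl (pvStepB arr v) (pvStepB arr v (stk, s) c)) = _
      rw [show pvStepB arr v (stk, s) c = (stk, s) from by unfold pvStepB; rw [if_neg hcond]]
      exact ih _ _ ht

lemma adj_of_mem_nbrsB {y x : Int} {c : Int × Int}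
    (hc : c ∈ ([(y + 1, x), (y - 1, x), (y, x + 1), (y, x - 1)] : List (Int × Int))) :
    Adj (y, x) c := by
  simp only [List.mem_cons, List.not_mem_nil, or_false] at hc
  rcases hc with rfl | rfl | rfl | rfl
  · left; rfl
  · right; left; rfl
  · right; right; left; rfl
  · right; right; right; rfl

lemma nbrsB_of_adj {y x : Int} {z : Int × Int} (hz : Adj (y, x) z) :
    z ∈ ([(y + 1, x), (y - 1, x), (y, x + 1), (y, x - 1)] : List (Int × Int)) := by
  rcases hz with rfl | rfl | rfl | rfl <;> simp

-- ===== loop invariant for port B's DFS flood fill =====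
structure InvB (arr : List (List Int)) (v : Int) (Pp stk : List (Int × Int))
    (vis : PySem.Set (Int × Int)) : Prop where
  nodupP : Pp.Nodup
  nodupS : stk.Nodup
  disj : ∀ c ∈ Pp, c ∉ stk
  visIff : ∀ c, c ∈ vis ↔ c ∈ Pp ∨ c ∈ stk
  grid : ∀ c, c ∈ Pp ∨ c ∈ stk → InG arr c
  sound : ∀ c, c ∈ Pp ∨ c ∈ stk → Reach arr v c
  startV : ((0, 0) : Int × Int) ∈ Pp ∨ ((0, 0) : Int × Int) ∈ stk
  closure : ∀ c ∈ Pp, ∀ z, Adj c z → InG arr z → v ≤ pvVal arr z.1 z.2 → (z ∈ Pp ∨ z ∈ stk)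

-- what the DFS has computed when its stack empties
def GoodVis (arr : List (List Int)) (v : Int) (vis : PySem.Set (Int × Int)) : Prop :=
  (∀ c ∈ vis, Reach arr v c) ∧ (((0, 0) : Int × Int) ∈ vis) ∧
    (∀ c ∈ vis, ∀ z, Adj c z → InG arr z → v ≤ pvVal arr z.1 z.2 → z ∈ vis)

lemma goodVis_mem {arr : List (List Int)} {v : Int} {vis : PySem.Set (Int × Int)}
    (hg : GoodVis arr v vis) {z : Int × Int} (hz : Reach arr v z) : z ∈ vis := by
  induction hz with
  | start h => exact hg.2.1
  | step hr ha hgz hv ih => exact hg.2.2 _ ih _ ha hgz hv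

lemma termGoodB {arr : List (List Int)} {v : Int} {Pp : List (Int × Int)}
    {vis : PySem.Set (Int × Int)} (hI : InvB arr v Pp [] vis) : GoodVis arr v vis := by
  refine ⟨?_, ?_, ?_⟩
  · intro c hc
    exact hI.sound c ((hI.visIff c).1 hc)
  · exact (hI.visIff _).2 hI.startV
  · intro c hc z ha hg hv
    rcases (hI.visIff c).1 hc with hcP | hcS
    · exact (hI.visIff z).2 (hI.closure c hcP z ha hg hv)
    · cases hcS

lemma lemB (arr : List (List Int)) (v : Int) :
    ∀ (fuel : Nat) (Pp stk : List (Int × Int)) (vis : PySem.Set (Int × Int)),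
      InvB arr v Pp stk vis →
      arr.length * (arr.getD 0 []).length ≤ fuel + Pp.length →
      GoodVis arr v (pvDfs arr v fuel stk vis) := by
  intro fuel
  induction fuel with
  | zero =>
    intro Pp stk vis hI hf
    cases stk with
    | nil => exact termGoodB hI
    | cons c s' =>
      exfalso
      have hnd : (Pp ++ c :: s').Nodup := by
        rw [List.nodup_append]
        exact ⟨hI.nodupP, hI.nodupS, fun a ha b hb heq => hI.disj a ha (by rw [heq]; exact hb)⟩
      have hgr : ∀ z ∈ Pp ++ c :: s', InG arr z := by
        intro z hz
        rcases List.mem_append.1 hz with h | h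
        · exact hI.grid z (Or.inl h)
        · exact hI.grid z (Or.inr h)
      have := card_grid arr _ hnd hgr
      simp only [List.length_append, List.length_cons] at this
      omega
  | succ fuel ih =>
    intro Pp stk vis hI hf
    rcases List.eq_nil_or_concat stk with rfl | ⟨init, c, rfl⟩
    · exact termGoodB hI
    · obtain ⟨cy, cx⟩ := c
      simp only [List.concat_eq_append] at hI ⊢
      have hpop : PySem.List.pop? (init ++ [((cy : Int), (cx : Int))]) (-1) = some ((cy, cx), init) :=
        PySem.List.pop?_last init (cy, cx)
      simp only [pvDfs, hpop]
      have hndn : ([(cy + 1, cx), (cy - 1, cx), (cy, cx + 1), (cy, cx - 1)] : List (Int × Int)).Nodup := by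
        simp [Prod.ext_iff]; omega
      rw [foldB_char arr v _ init vis hndn]
      set news := ([(cy + 1, cx), (cy - 1, cx), (cy, cx + 1), (cy, cx - 1)] : List (Int × Int)).filter
        (pvEligB arr v vis) with hnews
      have hstkmem : ((cy, cx) : Int × Int) ∈ init ++ [((cy : Int), (cx : Int))] :=
        List.mem_append.2 (Or.inr (List.mem_singleton.2 rfl))
      have hvisC : ((cy, cx) : Int × Int) ∈ vis := (hI.visIff _).2 (Or.inr hstkmem)
      have hfresh : ∀ z ∈ news, InG arr z ∧ z ∉ vis ∧ v ≤ pvVal arr z.1 z.2 := by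
        intro z hz
        have h1 := List.of_mem_filter hz
        have h2 : 0 ≤ z.1 ∧ z.1 < (arr.length : Int) ∧ 0 ≤ z.2
            ∧ z.2 < ((arr.getD 0 []).length : Int) ∧ (z.1, z.2) ∉ vis ∧ v ≤ pvVal arr z.1 z.2 :=
          of_decide_eq_true h1
        exact ⟨⟨h2.1, h2.2.1, h2.2.2.1, h2.2.2.2.1⟩, h2.2.2.2.2.1, h2.2.2.2.2.2⟩
      have hAdjNews : ∀ z ∈ news, Adj (cy, cx) z :=
        fun z hz => adj_of_mem_nbrsB (List.mem_of_mem_filter hz)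
      have hinitSub : ∀ z ∈ init, z ∈ init ++ [((cy : Int), (cx : Int))] :=
        fun z hz => List.mem_append.2 (Or.inl hz)
      have hcNotInit : ((cy, cx) : Int × Int) ∉ init := by
        have := (List.nodup_append.1 hI.nodupS).2.2
        intro hmem
        exact this _ hmem _ (List.mem_singleton.2 rfl) rfl
      have hinitNodup : init.Nodup := (List.nodup_append.1 hI.nodupS).1
      refine ih ((cy, cx) :: Pp) (init ++ news) (vis ++ news)
        { nodupP := ?_, nodupS := ?_, disj := ?_, visIff := ?_, grid := ?_, sound := ?_,
          startV := ?_, closure := ?_ } ?_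
      · exact List.nodup_cons.2 ⟨fun hyp => hI.disj _ hyp hstkmem, hI.nodupP⟩
      · rw [List.nodup_append]
        refine ⟨hinitNodup, List.Nodup.filter _ hndn, ?_⟩
        intro a ha b hb heq
        exact (hfresh b hb).2.1 (by rw [← heq]; exact (hI.visIff a).2 (Or.inr (hinitSub a ha)))
      · intro z hz hmem
        rcases List.mem_append.1 hmem with hin | hnw
        · rcases List.mem_cons.1 hz with rfl | hzP
          · exact hcNotInit hin
          · exact hI.disj z hzP (hinitSub z hin)
        · rcases List.mem_cons.1 hz with rfl | hzP
          · exact (hfresh _ hnw).2.1 hvisC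
          · exact (hfresh z hnw).2.1 ((hI.visIff z).2 (Or.inl hzP))
      · intro z
        have hsm : z ∈ init ++ [((cy : Int), (cx : Int))] ↔ z ∈ init ∨ z = (cy, cx) := by
          rw [List.mem_append, List.mem_singleton]
        simp only [List.mem_append, List.mem_cons, hI.visIff z, hsm]
        tauto
      · intro z hz
        rcases hz with hz | hz
        · rcases List.mem_cons.1 hz with rfl | hzP
          · exact hI.grid _ (Or.inr hstkmem)
          · exact hI.grid z (Or.inl hzP)
        · rcases List.mem_append.1 hz with hin | hnw
          · exact hI.grid z (Or.inr (hinitSub z hin))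
          · exact (hfresh z hnw).1
      · intro z hz
        rcases hz with hz | hz
        · rcases List.mem_cons.1 hz with rfl | hzP
          · exact hI.sound _ (Or.inr hstkmem)
          · exact hI.sound z (Or.inl hzP)
        · rcases List.mem_append.1 hz with hin | hnw
          · exact hI.sound z (Or.inr (hinitSub z hin))
          · exact .step (hI.sound _ (Or.inr hstkmem)) (hAdjNews z hnw) (hfresh z hnw).1
              (hfresh z hnw).2.2
      · rcases hI.startV with h | h
        · exact Or.inl (List.mem_cons_of_mem _ h)
        · rcases List.mem_append.1 h with h | h
          · exact Or.inr (List.mem_append.2 (Or.inl h))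
          · exact Or.inl (by rw [List.mem_singleton.1 h]; exact List.mem_cons_self ..)
      · intro z hz w ha hg hv
        rcases List.mem_cons.1 hz with rfl | hzP
        · by_cases hwv : w ∈ vis
          · rcases (hI.visIff w).1 hwv with hwP | hwS
            · exact Or.inl (List.mem_cons_of_mem _ hwP)
            · rcases List.mem_append.1 hwS with h | h
              · exact Or.inr (List.mem_append.2 (Or.inl h))
              · exact Or.inl (by rw [List.mem_singleton.1 h]; exact List.mem_cons_self ..)
          · have helig : pvEligB arr v vis w = true :=
              decide_eq_true ⟨hg.1, hg.2.1, hg.2.2.1, hg.2.2.2, hwv, hv⟩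
            exact Or.inr (List.mem_append.2 (Or.inr (List.mem_filter.2 ⟨nbrsB_of_adj ha, helig⟩)))
        · rcases hI.closure z hzP w ha hg hv with hwP | hwS
          · exact Or.inl (List.mem_cons_of_mem _ hwP)
          · rcases List.mem_append.1 hwS with h | h
            · exact Or.inr (List.mem_append.2 (Or.inl h))
            · exact Or.inl (by rw [List.mem_singleton.1 h]; exact List.mem_cons_self ..)
      · simp only [List.length_cons]
        omega

lemma connected_iff (arr : List (List Int)) (hp : Pre_pathWithMaxMinValue arr) (v : Int) :
    (pvConnected arr v = true ↔ Reach arr v (pvEnd arr)) := by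
  unfold pvConnected
  by_cases h0 : pvVal arr 0 0 < v
  · rw [if_pos h0]
    simp only [Bool.false_eq_true, false_iff]
    exact fun hr => absurd (reach_le_start hr) (not_le.2 h0)
  · rw [if_neg h0]
    have hG := lemB arr v (arr.length * (arr.getD 0 []).length + 1) [] [((0 : Int), (0 : Int))]
      (PySem.Set.ofList [((0 : Int), (0 : Int))])
      { nodupP := List.nodup_nil
        nodupS := by simp
        disj := by intro c hc; cases hc
        visIff := by intro c; rw [PySem.Set.mem_ofList]; simp
        grid := by
          intro c hc
          have : c = ((0 : Int), (0 : Int)) := by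
            rcases hc with h | h
            · cases h
            · exact List.mem_singleton.1 h
          rw [this]; exact inG_start hp
        sound := by
          intro c hc
          have : c = ((0 : Int), (0 : Int)) := by
            rcases hc with h | h
            · cases h
            · exact List.mem_singleton.1 h
          rw [this]; exact .start (not_lt.1 h0)
        startV := Or.inr (List.mem_singleton.2 rfl)
        closure := by intro c hc; cases hc } (by simp only [List.length_nil]; omega)
    rw [decide_eq_true_eq]
    constructor
    · intro h; exact hG.1 _ h
    · intro h; exact goodVis_mem hG h

-- ===== the sorted distinct value list =====
lemma mem_pvVals {arr : List (List Int)} {x : Int} :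
    x ∈ pvVals arr ↔ x ∈ pvAllVals arr := by
  unfold pvVals
  rw [PySem.List.mem_sorted, PySem.Set.mem_ofList]

lemma nodup_pvVals (arr : List (List Int)) : (pvVals arr).Nodup := by
  unfold pvVals
  rw [(PySem.List.sorted_perm _ _ _).nodup_iff]
  exact PySem.Set.nodup_ofList _

lemma desc_pvVals (arr : List (List Int)) : (pvVals arr).Pairwise (fun a b => b < a) := by
  have h1 : (pvVals arr).Pairwise (fun a b => b ≤ a) :=
    PySem.List.sorted_pairwise_rev (PySem.Set.ofList (pvAllVals arr)) (fun x => x)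
  exact (h1.and (nodup_pvVals arr)).imp
    (fun h => lt_of_le_of_ne h.1 h.2.symm)

lemma vals_anti (arr : List (List Int)) {p q : Nat} (hpq : p ≤ q)
    (hq : q < (pvVals arr).length) :
    (pvVals arr)[q] ≤ (pvVals arr)[p]'(lt_of_le_of_lt hpq hq) := by
  rcases Nat.lt_or_ge p q with h | h
  · exact le_of_lt (List.pairwise_iff_getElem.1 (desc_pvVals arr) p q _ hq h)
  · have : p = q := by omega
    subst this
    exact le_refl _

lemma conn_mono (arr : List (List Int)) (hp : Pre_pathWithMaxMinValue arr) {u v : Int}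
    (huv : u ≤ v) (h : pvConnected arr v = true) : pvConnected arr u = true :=
  (connected_iff arr hp u).2 (reach_mono huv ((connected_iff arr hp v).1 h))

lemma firstTrue_isAns (arr : List (List Int)) (hp : Pre_pathWithMaxMinValue arr) (lo : Int)
    (h0 : 0 ≤ lo) (hlen : lo < ((pvVals arr).length : Int))
    (hconn : pvConnected arr (PySem.List.pyGetD (pvVals arr) lo 0) = true)
    (hbelow : 0 < lo → pvConnected arr (PySem.List.pyGetD (pvVals arr) (lo - 1) 0) = false) :
    IsAns arr (PySem.List.pyGetD (pvVals arr) lo 0) := by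
  rw [PySem.List.pyGetD_eq_getElem (pvVals arr) 0 h0 hlen] at hconn ⊢
  constructor
  · exact (connected_iff arr hp _).1 hconn
  · intro u hu
    obtain ⟨v', hv'mem, hle, hr'⟩ := reach_round hp hu
    have hv'vals : v' ∈ pvVals arr := mem_pvVals.2 hv'mem
    obtain ⟨j, hj, hjv⟩ := List.mem_iff_getElem.1 hv'vals
    have hconnj : pvConnected arr ((pvVals arr)[j]) = true :=
      (connected_iff arr hp _).2 (by rw [hjv]; exact hr')
    by_cases hjlo : j < lo.toNat
    · exfalso
      have hlo0 : 0 < lo := by omega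
      have hfalse := hbelow hlo0
      rw [PySem.List.pyGetD_eq_getElem (pvVals arr) 0 (by omega) (by omega)] at hfalse
      have hle2 : (pvVals arr)[(lo - 1).toNat] ≤ (pvVals arr)[j]'hj :=
        vals_anti arr (by omega) (by omega)
      have := conn_mono arr hp hle2 hconnj
      rw [this] at hfalse
      cases hfalse
    · have h2 : (pvVals arr)[j]'hj ≤ (pvVals arr)[lo.toNat] :=
        vals_anti arr (by omega) hj
      rw [hjv] at h2
      omega

lemma lemSearch (arr : List (List Int)) (hp : Pre_pathWithMaxMinValue arr) :
    ∀ (k : Nat) (lo hi : Int),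
      (hi - lo).toNat ≤ k → 0 ≤ lo → lo ≤ hi → hi < ((pvVals arr).length : Int) →
      (0 < lo → pvConnected arr (PySem.List.pyGetD (pvVals arr) (lo - 1) 0) = false) →
      pvConnected arr (PySem.List.pyGetD (pvVals arr) hi 0) = true →
      IsAns arr (pvSearch arr (pvVals arr) lo hi) := by
  intro k
  induction k with
  | zero =>
    intro lo hi hk h0 hlh hhl hbelow hconn
    have hnlt : ¬ lo < hi := by omega
    rw [pvSearch, dif_neg hnlt]
    have : lo = hi := by omega
    subst this
    exact firstTrue_isAns arr hp lo h0 hhl hconn hbelow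
  | succ k ih =>
    intro lo hi hk h0 hlh hhl hbelow hconn
    by_cases hlt : lo < hi
    · rw [pvSearch, dif_pos hlt]
      have hmid := PySem.Int.floordiv_two_mid_bounds hlh
      have hmlt : PySem.Int.floordiv (lo + hi) 2 < hi :=
        (PySem.Int.floordiv_lt_iff_lt_mul (by omega)).2 (by omega)
      by_cases hc : pvConnected arr (PySem.List.pyGetD (pvVals arr) (PySem.Int.floordiv (lo + hi) 2) 0) = true
      · rw [if_pos hc]
        exact ih lo _ (by omega) h0 (by omega) (by omega) hbelow hc
      · rw [if_neg hc]
        have hcf : pvConnected arr (PySem.List.pyGetD (pvVals arr) (PySem.Int.floordiv (lo + hi) 2) 0) = false := by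
          rwa [Bool.not_eq_true] at hc
        refine ih _ hi (by omega) (by omega) (by omega) hhl ?_ hconn
        intro _
        have heq : PySem.Int.floordiv (lo + hi) 2 + 1 - 1 = PySem.Int.floordiv (lo + hi) 2 := by omega
        rw [heq]
        exact hcf
    · rw [pvSearch, dif_neg hlt]
      have : lo = hi := by omega
      subst this
      exact firstTrue_isAns arr hp lo h0 hhl hconn hbelow

lemma B_isAns (arr : List (List Int)) (hp : Pre_pathWithMaxMinValue arr) :
    IsAns arr (pathWithMaxMinValue_alt arr) := by
  have hstart : pvVal arr 0 0 ∈ pvVals arr := mem_pvVals.2 (mem_allVals (inG_start hp))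
  have hne : pvVals arr ≠ [] := List.ne_nil_of_mem hstart
  have hlen : 0 < (pvVals arr).length := List.length_pos_of_ne_nil hne
  have hminmem : pvMinV arr ∈ pvVals arr := mem_pvVals.2 (pvMinV_mem hp)
  obtain ⟨j, hj, hjv⟩ := List.mem_iff_getElem.1 hminmem
  have hlast : pvConnected arr (PySem.List.pyGetD (pvVals arr) (((pvVals arr).length : Int) - 1) 0) = true := by
    rw [PySem.List.pyGetD_eq_getElem (pvVals arr) 0 (by omega) (by omega)]
    refine (connected_iff arr hp _).2 (reach_mono ?_ (reach_min_end hp))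
    have h2 : (pvVals arr)[(((pvVals arr).length : Int) - 1).toNat] ≤ (pvVals arr)[j]'hj :=
      vals_anti arr (by omega) (by omega)
    rw [hjv] at h2
    exact h2
  unfold pathWithMaxMinValue_alt
  exact lemSearch arr hp ((((pvVals arr).length : Int) - 1) - 0).toNat 0
    (((pvVals arr).length : Int) - 1) (le_refl _) (le_refl _) (by omega) (by omega)
    (fun h => absurd h (lt_irrefl 0)) hlast

-- ===== VERDICT (by name: the statement is the Claim_ definition above) =====
theorem pathWithMaxMinValue_spec : Claim_equal_pathWithMaxMinValue := by
  intro arr hDom hPre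
  unfold Spec_pathWithMaxMinValue
  exact isAns_unique (A_isAns arr hPre) (B_isAns arr hPre)
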